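-- pv_equiv track=rewrite | github.com/Kyoung-yeon99/Jump_to_Algorithm | Jump_to_Algorithm2/week29/SeoyeonHong/n^2배열자르기.py | solution
-- ===== SOURCE A (Python) =====
-- def solution(n, left, right):
--     arr = []
--     for i in range(left, right + 1):
--         mod = (i + 1) % n # i + 1 번째 숫자에 대해
--         min_num = (i + 1) // n + 1 # 첫번째 배열의 몇번째 행인지 계산 -> 최소 숫자 계산
--         if mod == 0:
--             arr.append(n) # n번째 숫자는 무조건 n
--         else:
--             arr.append(max(min_num, mod))
--
--     return arr
-- ===== SOURCE B (Python) =====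
-- def solution(n, left, right):
--     # Row decomposition: values j = i+1 for i in [left, right]; row q holds
--     # j in [q*n, q*n+n-1]; within a row, offset r gives n at r==0, then a flat
--     # run of q+1 for 1 <= r <= q+1, then the increasing run r for r > q+1.
--     out = []
--     lo, hi = left + 1, right + 1
--     if lo > hi:
--         return out
--     for q in range(lo // n, hi // n + 1):
--         base = q * n
--         r0 = max(0, lo - base)
--         r1 = min(n - 1, hi - base)
--         if r0 == 0:
--             out.append(n)
--         c = max(r0, 1)
--         flat_end = min(r1, q + 1)
--         out.extend([q + 1] * (flat_end - c + 1))
--         out.extend(range(max(c, q + 2), r1 + 1))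
--     return out
-- ===== Notes on version B (the rewrite author's own statement) =====
-- stated objective: alternative
-- what changed: B replaces A's per-index loop (computing mod and floor-division for every element) with a row decomposition: it iterates over the rows of the n×n grid that the slice touches and emits each row's run structure directly (the row head n, a constant run of q+1, then the increasing tail), clipping the first and last rows.
-- outside the precondition, e.g. on solution(-3, 0, 2): A returns [0, 0, -3], B returns [-3]; on solution(0, 0, 2): A raises ZeroDivisionError, B raises ZeroDivisionError
import Mathlib
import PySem

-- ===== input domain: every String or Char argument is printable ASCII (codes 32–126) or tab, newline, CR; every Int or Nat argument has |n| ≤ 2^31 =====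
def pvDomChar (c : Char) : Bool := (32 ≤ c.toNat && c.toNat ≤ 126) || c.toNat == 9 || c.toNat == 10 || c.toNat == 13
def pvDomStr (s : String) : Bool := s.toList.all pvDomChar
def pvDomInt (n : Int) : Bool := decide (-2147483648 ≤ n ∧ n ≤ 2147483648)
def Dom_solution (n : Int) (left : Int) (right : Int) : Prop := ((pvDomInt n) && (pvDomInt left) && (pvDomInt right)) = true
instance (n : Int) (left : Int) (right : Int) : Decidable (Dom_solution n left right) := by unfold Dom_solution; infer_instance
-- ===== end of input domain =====

-- B rebuilds the slice row by row from each row's run structure (simpler decomposition, not claimed faster).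

-- ===== PORT A =====
def solution (n : Int) (left : Int) (right : Int) : List Int :=
  (PySem.List.pyRange left (right + 1) 1).foldl (fun arr i =>
    let md := PySem.Int.mod (i + 1) n
    let min_num := PySem.Int.floordiv (i + 1) n + 1
    if md = 0 then arr ++ [n] else arr ++ [max min_num md]) []

-- ===== PORT B =====
def solution_alt (n : Int) (left : Int) (right : Int) : List Int :=
  let lo := left + 1
  let hi := right + 1
  if lo > hi then []
  else
    (PySem.List.pyRange (PySem.Int.floordiv lo n) (PySem.Int.floordiv hi n + 1) 1).foldl
      (fun out q =>
        let base := q * n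
        let r0 := max 0 (lo - base)
        let r1 := min (n - 1) (hi - base)
        let out := if r0 = 0 then out ++ [n] else out
        let c := max r0 1
        let flatEnd := min r1 (q + 1)
        let out := out ++ List.replicate (flatEnd - c + 1).toNat (q + 1)
        out ++ PySem.List.pyRange (max c (q + 2)) (r1 + 1) 1) []

-- ===== PRECONDITION & SPEC =====
-- Pre_ restricts to the natural domain n ≥ 1 (grid size): n = 0 raises ZeroDivisionError
-- in A, and negative n is outside the task's natural domain (A returns floor-mod
-- wraparound values there that no caller of an n×n-grid slicer would ask for).
def Pre_solution (n : Int) (left : Int) (right : Int) : Prop := 1 ≤ n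
instance (n : Int) (left : Int) (right : Int) : Decidable (Pre_solution n left right) := by unfold Pre_solution; infer_instance
def pvWitness_solution : Int × Int × Int := (3, 2, 5)
def Spec_solution (n : Int) (left : Int) (right : Int) (out : List Int) : Prop := out = solution_alt n left right
instance (n : Int) (left : Int) (right : Int) (out : List Int) : Decidable (Spec_solution n left right out) := by unfold Spec_solution; infer_instance

-- ===== CLAIM (what is proved, stated in full; the proofs are below) =====
def Claim_equal_solution : Prop := ∀ (n : Int) (left : Int) (right : Int), Dom_solution n left right → Pre_solution n left right → Spec_solution n left right (solution n left right)

-- ===== LEMMAS AND PROOFS =====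

-- the per-index value both programs compute, as a function of j = i + 1
def pvG (n j : Int) : Int :=
  if PySem.Int.mod j n = 0 then n else max (PySem.Int.floordiv j n + 1) (PySem.Int.mod j n)

-- B's per-row segment (lo hi fixed, row q)
def pvSeg (n lo hi q : Int) : List Int :=
  (if max 0 (lo - q * n) = 0 then [n] else []) ++
  List.replicate (min (min (n - 1) (hi - q * n)) (q + 1) - max (max 0 (lo - q * n)) 1 + 1).toNat (q + 1) ++
  PySem.List.pyRange (max (max (max 0 (lo - q * n)) 1) (q + 2)) (min (n - 1) (hi - q * n) + 1) 1

theorem pvA_eq_map (n left right : Int) :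
    solution n left right = (PySem.List.pyRange left (right + 1) 1).map (fun i => pvG n (i + 1)) := by
  unfold solution
  have hb : (fun (arr : List Int) i =>
      let md := PySem.Int.mod (i + 1) n
      let min_num := PySem.Int.floordiv (i + 1) n + 1
      if md = 0 then arr ++ [n] else arr ++ [max min_num md]) =
      fun (arr : List Int) i => arr ++ [pvG n (i + 1)] := by
    funext arr i
    simp only [pvG]
    split <;> rfl
  rw [hb, PySem.List.foldl_append_singleton_eq_map, List.nil_append]

theorem pvB_eq_flatMap (n left right : Int) (h : left + 1 ≤ right + 1) :
    solution_alt n left right =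
      (PySem.List.pyRange (PySem.Int.floordiv (left + 1) n) (PySem.Int.floordiv (right + 1) n + 1) 1).flatMap
        (pvSeg n (left + 1) (right + 1)) := by
  unfold solution_alt
  simp only [if_neg (by omega : ¬ left + 1 > right + 1)]
  have hb : (fun (out : List Int) q =>
      let base := q * n
      let r0 := max 0 (left + 1 - base)
      let r1 := min (n - 1) (right + 1 - base)
      let out := if r0 = 0 then out ++ [n] else out
      let c := max r0 1
      let flatEnd := min r1 (q + 1)
      let out := out ++ List.replicate (flatEnd - c + 1).toNat (q + 1)
      out ++ PySem.List.pyRange (max c (q + 2)) (r1 + 1) 1) =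
      fun (out : List Int) q => out ++ pvSeg n (left + 1) (right + 1) q := by
    funext out q
    simp only [pvSeg]
    split <;> simp
  rw [hb, PySem.List.foldl_append_eq_flatMap, List.nil_append]

-- map of max over a contiguous range = flat run ++ increasing run
theorem pvMapMax (m : Int) : ∀ (k : Nat) (c d : Int), d - c = (k : Int) →
    (PySem.List.pyRange c d 1).map (fun r => max m r) =
      List.replicate (min (d - 1) m - c + 1).toNat m ++ PySem.List.pyRange (max c (m + 1)) d 1 := by
  intro k
  induction k with
  | zero =>
    intro c d h
    have hdc : d ≤ c := by omega
    have ht : (min (d - 1) m - c + 1).toNat = 0 := by omega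
    rw [PySem.List.pyRange_one_eq_nil hdc,
        PySem.List.pyRange_one_eq_nil (le_trans hdc (le_max_left c (m + 1))), ht]
    rfl
  | succ k ih =>
    intro c d h
    have hcd : c < d := by omega
    rw [PySem.List.pyRange_one_cons hcd, List.map_cons, ih (c + 1) d (by omega)]
    by_cases hm : c ≤ m
    · have h1 : max m c = m := by omega
      have ht : (min (d - 1) m - c + 1).toNat = (min (d - 1) m - (c + 1) + 1).toNat + 1 := by omega
      have h2 : max c (m + 1) = max (c + 1) (m + 1) := by omega
      rw [h1, ht, h2, List.replicate_succ]
      rfl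
    · have h1 : max m c = c := by omega
      have ht0 : (min (d - 1) m - c + 1).toNat = 0 := by omega
      have ht0' : (min (d - 1) m - (c + 1) + 1).toNat = 0 := by omega
      have h2 : max c (m + 1) = c := by omega
      have h3 : max (c + 1) (m + 1) = c + 1 := by omega
      rw [h1, ht0, ht0', h2, h3, List.replicate_zero, List.nil_append, List.nil_append,
          PySem.List.pyRange_one_cons hcd]

-- reindex a mapped range by a constant shift
theorem pvShift (F : Int → Int) (a b t : Int) :
    (PySem.List.pyRange a b 1).map F =
      (PySem.List.pyRange (a - t) (b - t) 1).map (fun r => F (r + t)) := by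
  rw [PySem.List.pyRange_one a b, PySem.List.pyRange_one (a - t) (b - t)]
  simp only [List.map_map]
  have : b - t - (a - t) = b - a := by ring
  rw [this]
  refine List.map_congr_left ?_
  intro x _
  simp only [Function.comp]
  congr 1
  ring

-- pvG on row q at offset r
theorem pvG_row (n q r : Int) (hn : 1 ≤ n) (h0 : 0 ≤ r) (h1 : r < n) :
    pvG n (r + q * n) = if r = 0 then n else max (q + 1) r := by
  have hq : PySem.Int.floordiv (r + q * n) n = q := by
    rw [PySem.Int.floordiv_eq_iff_of_pos (by omega)]
    have : (q + 1) * n = q * n + n := by ring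
    omega
  have hm : PySem.Int.mod (r + q * n) n = r := by
    have h := PySem.Int.floordiv_mul_add_mod (r + q * n) n
    rw [hq] at h
    omega
  unfold pvG
  rw [hm, hq]

-- one row: the segment equals the per-index map over the row's j-interval
theorem pvRow (n q s e : Int) (hn : 1 ≤ n) (h1 : q * n ≤ s) (h2 : s ≤ e) (h3 : e < q * n + n) :
    pvSeg n s e q = (PySem.List.pyRange s (e + 1) 1).map (pvG n) := by
  have hr0 : max 0 (s - q * n) = s - q * n := by omega
  have hr1 : min (n - 1) (e - q * n) = e - q * n := by omega
  rw [pvShift (pvG n) s (e + 1) (q * n)]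
  have hmap : (PySem.List.pyRange (s - q * n) (e + 1 - q * n) 1).map (fun r => pvG n (r + q * n)) =
      (PySem.List.pyRange (s - q * n) (e + 1 - q * n) 1).map
        (fun r => if r = 0 then n else max (q + 1) r) := by
    refine List.map_congr_left ?_
    intro r hr
    rw [PySem.List.mem_pyRange_one] at hr
    exact pvG_row n q r hn (by omega) (by omega)
  rw [hmap]
  unfold pvSeg
  rw [hr0, hr1]
  by_cases h0 : s - q * n = 0
  · have hrhs : (PySem.List.pyRange (s - q * n) (e + 1 - q * n) 1).map
        (fun r => if r = 0 then n else max (q + 1) r) =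
        n :: (PySem.List.pyRange 1 (e - q * n + 1) 1).map (fun r => max (q + 1) r) := by
      rw [h0, show e + 1 - q * n = e - q * n + 1 from by ring,
          PySem.List.pyRange_one_cons (by omega : (0:Int) < e - q * n + 1), List.map_cons,
          if_pos rfl, show (0:Int) + 1 = 1 from by norm_num]
      congr 1
      refine List.map_congr_left ?_
      intro r hr
      rw [PySem.List.mem_pyRange_one] at hr
      rw [if_neg (by omega)]
    rw [hrhs, pvMapMax (q + 1) (e - q * n).toNat 1 (e - q * n + 1) (by omega)]
    rw [if_pos h0, h0]
    rw [show max (0:Int) 1 = 1 from by norm_num,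
        show e - q * n + 1 - 1 = e - q * n from by ring,
        show q + 1 + 1 = q + 2 from by ring,
        show max (1:Int) (q + 2) = max 1 (q + 2) from rfl]
    simp
  · rw [if_neg h0, List.nil_append]
    have hmax : max (s - q * n) 1 = s - q * n := by omega
    have hall : (PySem.List.pyRange (s - q * n) (e + 1 - q * n) 1).map
        (fun r => if r = 0 then n else max (q + 1) r) =
        (PySem.List.pyRange (s - q * n) (e + 1 - q * n) 1).map (fun r => max (q + 1) r) := by
      refine List.map_congr_left ?_
      intro r hr
      rw [PySem.List.mem_pyRange_one] at hr
      rw [if_neg (by omega)]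
    rw [hall, pvMapMax (q + 1) (e + 1 - q * n - (s - q * n)).toNat (s - q * n) (e + 1 - q * n) (by omega)]
    rw [hmax, show e + 1 - q * n - 1 = e - q * n from by ring,
        show e + 1 - q * n = e - q * n + 1 from by ring,
        show q + 1 + 1 = q + 2 from by ring]

-- multi-row: flatMap of segments over the row range = map over the whole interval
theorem pvMainAux (n : Int) (hn : 1 ≤ n) : ∀ (k : Nat) (ql qh lo hi : Int),
    ql * n ≤ lo → lo < ql * n + n → qh * n ≤ hi → hi < qh * n + n → lo ≤ hi →
    (qh - ql).toNat = k →
    (PySem.List.pyRange ql (qh + 1) 1).flatMap (pvSeg n lo hi) =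
      (PySem.List.pyRange lo (hi + 1) 1).map (pvG n) := by
  intro k
  induction k with
  | zero =>
    intro ql qh lo hi h1 h2 h3 h4 h5 hk
    have hle : ql ≤ qh := by
      by_contra hc
      have := mul_le_mul_of_nonneg_right (by omega : qh + 1 ≤ ql) (by omega : (0:Int) ≤ n)
      rw [add_mul, one_mul] at this
      omega
    have heq : qh = ql := by omega
    subst heq
    rw [PySem.List.pyRange_one_singleton]
    simp only [List.flatMap_cons, List.flatMap_nil, List.append_nil]
    exact pvRow n qh lo hi hn h1 h5 (by omega)
  | succ k ih =>
    intro ql qh lo hi h1 h2 h3 h4 h5 hk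
    have hlt : ql < qh := by
      by_contra hc
      have := mul_le_mul_of_nonneg_right (by omega : qh ≤ ql) (by omega : (0:Int) ≤ n)
      omega
    have hm : (ql + 1) * n ≤ qh * n :=
      mul_le_mul_of_nonneg_right (by omega) (by omega)
    rw [add_mul, one_mul] at hm
    rw [PySem.List.pyRange_one_cons (by omega : ql < qh + 1)]
    simp only [List.flatMap_cons]
    have hseg1 : pvSeg n lo hi ql = (PySem.List.pyRange lo (ql * n + n) 1).map (pvG n) := by
      have he : pvSeg n lo hi ql = pvSeg n lo (ql * n + n - 1) ql := by
        unfold pvSeg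
        rw [show min (n - 1) (hi - ql * n) = n - 1 from by omega,
            show min (n - 1) (ql * n + n - 1 - ql * n) = n - 1 from by omega]
      rw [he, pvRow n ql lo (ql * n + n - 1) hn h1 (by omega) (by omega),
          show ql * n + n - 1 + 1 = ql * n + n from by ring]
    have hseg2 : (PySem.List.pyRange (ql + 1) (qh + 1) 1).flatMap (pvSeg n lo hi) =
        (PySem.List.pyRange (ql + 1) (qh + 1) 1).flatMap (pvSeg n (ql * n + n) hi) := by
      rw [List.flatMap_def, List.flatMap_def]
      congr 1
      refine List.map_congr_left ?_
      intro q hq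
      rw [PySem.List.mem_pyRange_one] at hq
      have hqn : (ql + 1) * n ≤ q * n :=
        mul_le_mul_of_nonneg_right (by omega) (by omega)
      rw [add_mul, one_mul] at hqn
      unfold pvSeg
      rw [show max 0 (lo - q * n) = 0 from by omega,
          show max 0 (ql * n + n - q * n) = 0 from by omega]
    have hIH := ih (ql + 1) qh (ql * n + n) hi
      (by rw [add_mul, one_mul]) (by rw [add_mul, one_mul]; omega) h3 h4 (by omega) (by omega)
    rw [hseg1, hseg2, hIH, ← List.map_append,
        ← PySem.List.pyRange_one_append lo (ql * n + n) (hi + 1) (by omega) (by omega)]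

theorem pvMain (n : Int) (hn : 1 ≤ n) (lo hi : Int) (h : lo ≤ hi) :
    (PySem.List.pyRange (PySem.Int.floordiv lo n) (PySem.Int.floordiv hi n + 1) 1).flatMap (pvSeg n lo hi) =
      (PySem.List.pyRange lo (hi + 1) 1).map (pvG n) := by
  have hlo := (PySem.Int.floordiv_eq_iff_of_pos (by omega : (0:Int) < n)).mp
    (rfl : PySem.Int.floordiv lo n = PySem.Int.floordiv lo n)
  have hhi := (PySem.Int.floordiv_eq_iff_of_pos (by omega : (0:Int) < n)).mp
    (rfl : PySem.Int.floordiv hi n = PySem.Int.floordiv hi n)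
  rw [add_mul, one_mul] at hlo hhi
  exact pvMainAux n hn (PySem.Int.floordiv hi n - PySem.Int.floordiv lo n).toNat
    (PySem.Int.floordiv lo n) (PySem.Int.floordiv hi n) lo hi hlo.1 (by omega) hhi.1 (by omega) h rfl

-- ===== VERDICT (by name: the statement is the Claim_ definition above) =====
theorem solution_spec : Claim_equal_solution := by
  intro n left right _ hn
  unfold Pre_solution at hn
  unfold Spec_solution
  by_cases h : left + 1 ≤ right + 1
  · rw [pvA_eq_map, pvB_eq_flatMap n left right h,
      pvMain n hn (left + 1) (right + 1) h]
    rw [PySem.List.pyRange_one left (right + 1), PySem.List.pyRange_one (left + 1) (right + 1 + 1)]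
    simp only [List.map_map]
    have : (right + 1 + 1) - (left + 1) = (right + 1) - left := by ring
    rw [this]
    refine List.map_congr_left ?_
    intro k _
    simp only [Function.comp]
    congr 1
    ring
  · have hlr : right + 1 ≤ left := by omega
    unfold solution solution_alt
    rw [PySem.List.pyRange_one_eq_nil hlr]
    simp only [List.foldl_nil]
    simp only [if_pos (by omega : left + 1 > right + 1)]
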